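-- pv_equiv track=rewrite | github.com/sohn0356-git/TIL | unknown_source_code/210319/2.py | solution
-- ===== SOURCE A (Python) =====
-- def solution(gift_cards, wants):
--     answer = 0
--     cards = {}
--     for g in gift_cards:
--         if cards.get(g):
--             cards[g] += 1
--         else:
--             cards[g] = 1
--     for w in wants:
--         if cards.get(w):
--             if cards[w]>0:
--                 cards[w] -= 1
--             else:
--                 answer += 1
--         else:
--             answer += 1
--     return answer
-- ===== SOURCE B (Python) =====
-- def solution(gift_cards, wants):
--     cards = {}
--     for g in gift_cards:
--         cards[g] = cards.get(g, 0) + 1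
--     need = {}
--     for w in wants:
--         need[w] = need.get(w, 0) + 1
--     return sum(max(0, c - cards.get(v, 0)) for v, c in need.items())
-- ===== Notes on version B (the rewrite author's own statement) =====
-- stated objective: simpler
-- what changed: Replaces A's item-by-item consume-and-decrement loop over wants with two frequency tables and a single aggregate deficit sum max(0, need[v]-cards[v]) over the distinct wanted values.
import Mathlib
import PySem

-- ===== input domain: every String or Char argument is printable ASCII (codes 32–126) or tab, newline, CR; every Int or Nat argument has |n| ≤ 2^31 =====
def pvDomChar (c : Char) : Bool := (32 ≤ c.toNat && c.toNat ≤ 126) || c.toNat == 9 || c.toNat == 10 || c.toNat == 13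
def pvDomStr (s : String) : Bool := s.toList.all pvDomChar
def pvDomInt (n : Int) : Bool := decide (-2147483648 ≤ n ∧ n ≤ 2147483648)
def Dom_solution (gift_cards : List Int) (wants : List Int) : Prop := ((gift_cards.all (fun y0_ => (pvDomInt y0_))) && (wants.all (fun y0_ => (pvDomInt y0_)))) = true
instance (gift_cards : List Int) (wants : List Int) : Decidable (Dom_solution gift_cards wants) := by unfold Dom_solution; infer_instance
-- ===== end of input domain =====

-- B replaces A's item-by-item consume-and-decrement loop over wants by two frequency
-- tables and one aggregate deficit sum over the distinct wanted values (same cost, simpler).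


-- ===== PORT A =====
def solution (gift_cards : List Int) (wants : List Int) : Int :=
  let cards := gift_cards.foldl (fun d g =>
    if d.getD g 0 ≠ 0 then d.insert g (d.getD g 0 + 1) else d.insert g 1)
    (PySem.Dict.empty : PySem.Dict Int Int)
  let r := wants.foldl (fun (s : Int × PySem.Dict Int Int) w =>
    if s.2.getD w 0 ≠ 0 then
      if s.2.getD w 0 > 0 then (s.1, s.2.insert w (s.2.getD w 0 - 1))
      else (s.1 + 1, s.2)
    else (s.1 + 1, s.2)) (0, cards)
  r.1

-- ===== PORT B =====
def solution_alt (gift_cards : List Int) (wants : List Int) : Int :=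
  let cards := gift_cards.foldl (fun d g => d.insert g (d.getD g 0 + 1))
    (PySem.Dict.empty : PySem.Dict Int Int)
  let need := wants.foldl (fun d w => d.insert w (d.getD w 0 + 1))
    (PySem.Dict.empty : PySem.Dict Int Int)
  need.items.foldl (fun a p => a + max 0 (p.2 - cards.getD p.1 0)) 0

-- ===== PRECONDITION & SPEC =====
def Spec_solution (gift_cards : List Int) (wants : List Int) (out : Int) : Prop := out = solution_alt gift_cards wants
instance (gift_cards : List Int) (wants : List Int) (out : Int) : Decidable (Spec_solution gift_cards wants out) := by unfold Spec_solution; infer_instance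

-- ===== CLAIM (what is proved, stated in full; the proofs are below) =====
def Claim_equal_solution : Prop := ∀ (gift_cards : List Int) (wants : List Int), Dom_solution gift_cards wants → Spec_solution gift_cards wants (solution gift_cards wants)

-- ===== LEMMAS AND PROOFS =====

-- abstract model of A's second loop: f is the (virtual) remaining-card count, decremented
-- on every want; a want contributes 1 exactly when its current count is ≤ 0
def deficit : List Int → (Int → Int) → Int
  | [], _ => 0
  | w :: ws, f => (if f w ≤ 0 then 1 else 0) + deficit ws (fun v => if v = w then f w - 1 else f v)

lemma countLoop_eq_counter (xs : List Int) :
    xs.foldl (fun d g => if d.getD g 0 ≠ 0 then d.insert g (d.getD g 0 + 1) else d.insert g 1)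
      (PySem.Dict.empty : PySem.Dict Int Int) = PySem.Dict.counter xs := by
  have hfun : (fun (d : PySem.Dict Int Int) g =>
      if d.getD g 0 ≠ 0 then d.insert g (d.getD g 0 + 1) else d.insert g 1)
      = fun d g => d.insert g (d.getD g 0 + 1) := by
    funext d g
    split_ifs with h
    · rfl
    · simp only [ne_eq, not_not] at h
      rw [h]
      norm_num
  rw [hfun, PySem.Dict.foldl_insert_getD_add_one_eq_counter]

-- A's want loop equals `deficit` under the invariant d.getD v 0 = max 0 (f v)
lemma wantLoop_eq_deficit (ws : List Int) (a : Int) (d : PySem.Dict Int Int) (f : Int → Int)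
    (h : ∀ v, d.getD v 0 = max 0 (f v)) :
    (ws.foldl (fun (s : Int × PySem.Dict Int Int) w =>
      if s.2.getD w 0 ≠ 0 then
        if s.2.getD w 0 > 0 then (s.1, s.2.insert w (s.2.getD w 0 - 1))
        else (s.1 + 1, s.2)
      else (s.1 + 1, s.2)) (a, d)).1 = a + deficit ws f := by
  induction ws generalizing a d f with
  | nil => simp [deficit]
  | cons w ws ih =>
    simp only [List.foldl_cons, deficit]
    by_cases hw : f w ≤ 0
    · have hd0 : d.getD w 0 = 0 := by rw [h w]; omega
      rw [hd0]
      rw [if_neg (show ¬((0:Int) ≠ 0) by norm_num)]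
      rw [ih (a + 1) d (fun v => if v = w then f w - 1 else f v) (by
        intro v
        by_cases hv : v = w
        · subst hv
          rw [hd0]
          have hb : ((fun v_1 => if v_1 = v then f v - 1 else f v_1) v) = f v - 1 := by
            simp
          rw [hb]
          omega
        · simp only [if_neg hv]; exact h v)]
      simp [hw]
      ring
    · have hfw : 0 < f w := by omega
      have hd : d.getD w 0 = f w := by rw [h w]; omega
      rw [hd]
      have hne : (f w ≠ 0) := by omega
      simp only [if_pos hne, if_pos hfw]
      rw [ih a (d.insert w (f w - 1)) (fun v => if v = w then f w - 1 else f v) (by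
        intro v
        rw [PySem.Dict.getD_insert]
        by_cases hv : v = w
        · simp only [if_pos hv]; omega
        · simp only [if_neg hv]; exact h v)]
      simp [hw]

lemma sum_map_congr_single {K : List Int} (hK : K.Nodup) {w : Int} (hw : w ∈ K)
    (t1 t2 : Int → Int) (h : ∀ v ∈ K, v ≠ w → t1 v = t2 v) :
    (K.map t1).sum = (K.map t2).sum + (t1 w - t2 w) := by
  induction K with
  | nil => cases hw
  | cons k K ih =>
    rcases List.mem_cons.mp hw with hk | hk
    · subst hk
      have hnot : w ∉ K := (List.nodup_cons.mp hK).1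
      have : K.map t1 = K.map t2 := by
        apply List.map_congr_left
        intro v hv
        exact h v (List.mem_cons_of_mem _ hv) (fun e => hnot (e ▸ hv))
      simp [this]; ring
    · have hkw : k ≠ w := by
        rintro rfl; exact (List.nodup_cons.mp hK).1 hk
      have := ih (List.nodup_cons.mp hK).2 hk
        (fun v hv hne => h v (List.mem_cons_of_mem _ hv) hne)
      simp only [List.map_cons, List.sum_cons, this, h k (List.mem_cons_self) hkw]
      ring

lemma deficit_eq_sum (ws : List Int) (f : Int → Int) (K : List Int)
    (hK : K.Nodup) (hsub : ∀ v ∈ ws, v ∈ K) :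
    deficit ws f =
      (K.map (fun v => max 0 ((ws.count v : Int) - f v) - max 0 (-f v))).sum := by
  induction ws generalizing f with
  | nil =>
    simp only [deficit]
    symm
    apply List.sum_eq_zero
    intro x hx
    simp only [List.mem_map] at hx
    obtain ⟨v, _, rfl⟩ := hx
    simp
  | cons w ws ih =>
    have hwK : w ∈ K := hsub w List.mem_cons_self
    have hsub' : ∀ v ∈ ws, v ∈ K := fun v hv => hsub v (List.mem_cons_of_mem _ hv)
    simp only [deficit]
    rw [ih (fun v => if v = w then f w - 1 else f v) hsub']
    rw [sum_map_congr_single hK hwK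
      (fun v => max 0 (((w :: ws).count v : Int) - f v) - max 0 (-f v))
      (fun v => max 0 ((ws.count v : Int) - (if v = w then f w - 1 else f v))
        - max 0 (-(if v = w then f w - 1 else f v)))
      (by
        intro v hv hne
        have hwv : ¬ (w = v) := fun e => hne e.symm
        simp [if_neg hne, hwv])]
    simp only [List.count_cons_self]
    push_cast
    by_cases hw : f w ≤ 0 <;> simp [hw] <;> omega

lemma foldl_add_eq_sum_map (l : List (Int × Int)) (a : Int) (g : Int × Int → Int) :
    l.foldl (fun a p => a + g p) a = a + (l.map g).sum := by
  induction l generalizing a with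
  | nil => simp
  | cons p l ih => simp [List.foldl_cons, ih]; ring

-- ===== VERDICT (by name: the statement is the Claim_ definition above) =====
theorem solution_spec : Claim_equal_solution := by
  intro gift_cards wants _
  unfold Spec_solution solution solution_alt
  simp only []
  rw [countLoop_eq_counter, PySem.Dict.foldl_insert_getD_add_one_eq_counter,
    PySem.Dict.foldl_insert_getD_add_one_eq_counter]
  rw [wantLoop_eq_deficit wants 0 (PySem.Dict.counter gift_cards)
    (fun v => (gift_cards.count v : Int)) (by
      intro v
      rw [PySem.Dict.getD_counter]
      exact (max_eq_right (Int.natCast_nonneg _)).symm)]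
  rw [deficit_eq_sum wants _ (PySem.Set.ofList wants)
    (PySem.Set.nodup_ofList wants) (fun v hv => (PySem.Set.mem_ofList _ _).mpr hv)]
  rw [PySem.Dict.items_counter, foldl_add_eq_sum_map]
  simp only [List.map_map, zero_add]
  congr 1
  apply List.map_congr_left
  intro v hv
  simp [PySem.Dict.getD_counter]
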